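-- pv_equiv track=rewrite | github.com/gawdeganesh/Data-Engineering | DSA/Interview/42. two_string.py | two_string
-- ===== SOURCE A (Python) =====
-- def two_string(input_str: str) -> list:
--     dict = {}
--
--     for ch in input_str:
--         dict[ch] = dict.get(ch, 0) + 1
--
--     string_1 = ""
--     string_2 = ""
--
--     for key, count in dict.items():
--         if count == 1:
--             string_1 += key
--         else:
--             string_2 += key
--
--     return string_1, string_2
-- ===== SOURCE B (Python) =====
-- def two_string(input_str: str) -> list:
--     seen = set()
--     string_1 = ""
--     string_2 = ""
--     for ch in input_str:
--         if ch not in seen: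
--             seen.add(ch)
--             if input_str.count(ch) == 1:
--                 string_1 += ch
--             else:
--                 string_2 += ch
--     return string_1, string_2
-- ===== Notes on version B (the rewrite author's own statement) =====
-- stated objective: simpler
-- what changed: A builds a character-frequency dictionary in one pass and then iterates the dict's items to split keys by count; B drops the counts table entirely: a single scan over the string with a `seen` set classifies each first occurrence on the spot via input_str.count(ch).
import Mathlib
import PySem

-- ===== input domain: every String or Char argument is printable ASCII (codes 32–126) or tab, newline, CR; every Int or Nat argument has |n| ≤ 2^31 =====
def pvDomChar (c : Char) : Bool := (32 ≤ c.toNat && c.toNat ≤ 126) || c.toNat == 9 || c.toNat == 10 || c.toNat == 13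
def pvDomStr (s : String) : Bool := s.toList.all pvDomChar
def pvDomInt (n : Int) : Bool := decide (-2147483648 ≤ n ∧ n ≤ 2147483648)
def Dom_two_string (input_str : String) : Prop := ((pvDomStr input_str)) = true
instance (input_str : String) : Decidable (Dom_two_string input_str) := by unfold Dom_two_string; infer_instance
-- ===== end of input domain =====

-- B replaces A's frequency dictionary with a single scan over the string that keeps a `seen` set and
-- classifies each first occurrence by `input_str.count(ch)` (objective: simpler — no counts table).

-- ===== PORT A =====
def two_string (input_str : String) : String × String :=
  let l := input_str.toList
  let d := l.foldl (fun d ch => d.insert ch (d.getD ch 0 + 1)) (PySem.Dict.empty : PySem.Dict Char Int)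
  let p := d.items.foldl
    (fun (p : List Char × List Char) kv =>
      if kv.2 = 1 then (p.1 ++ [kv.1], p.2) else (p.1, p.2 ++ [kv.1]))
    ([], [])
  (String.ofList p.1, String.ofList p.2)

-- ===== PORT B =====
def two_string_alt (input_str : String) : String × String :=
  let l := input_str.toList
  let st := l.foldl
    (fun (st : PySem.Set Char × List Char × List Char) ch =>
      if PySem.Set.contains st.1 ch then st
      else (PySem.Set.add st.1 ch,
            if PySem.Chars.count l [ch] = 1 then (st.2.1 ++ [ch], st.2.2)
            else (st.2.1, st.2.2 ++ [ch])))
    (PySem.Set.empty, [], [])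
  (String.ofList st.2.1, String.ofList st.2.2)

-- ===== PRECONDITION & SPEC =====
def Spec_two_string (input_str : String) (out : String × String) : Prop := out = two_string_alt input_str
instance (input_str : String) (out : String × String) : Decidable (Spec_two_string input_str out) := by unfold Spec_two_string; infer_instance

-- ===== CLAIM (what is proved, stated in full; the proofs are below) =====
def Claim_equal_two_string : Prop := ∀ (input_str : String), Dom_two_string input_str → Spec_two_string input_str (two_string input_str)

-- ===== LEMMAS AND PROOFS =====

-- str.count with a single-character needle is List.count (unfolds Chars.count's fueled scanner)
theorem pv_count_go_singleton (c : Char) : ∀ (fuel : Nat) (l : List Char) (acc : Nat), l.length ≤ fuel →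
    PySem.Chars.count.go [c] fuel l acc = acc + l.count c := by
  intro fuel
  induction fuel with
  | zero => intro l acc h; rw [Nat.le_zero, List.length_eq_zero_iff] at h; subst h; simp [PySem.Chars.count.go]
  | succ n ih =>
    intro l acc h
    cases l with
    | nil => simp [PySem.Chars.count.go]
    | cons a t =>
      rw [PySem.Chars.count.go]
      simp only [List.isPrefixOf, List.length_cons] at *
      by_cases hc : c = a
      · subst hc
        simp [ih t (acc + 1) (by omega)]
        omega
      · simp [hc, ih t acc (by omega), Ne.symm hc]

theorem pv_count_single (l : List Char) (c : Char) : PySem.Chars.count l [c] = l.count c := by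
  simp [PySem.Chars.count, pv_count_go_singleton c l.length l 0 le_rfl]

-- the common classification step both programs apply to each distinct character
def pvG (l : List Char) (p : List Char × List Char) (k : Char) : List Char × List Char :=
  if PySem.Chars.count l [k] = 1 then (p.1 ++ [k], p.2) else (p.1, p.2 ++ [k])

-- the characters of m not yet in `seen`, in first-occurrence order
def newElems (seen : List Char) : List Char → List Char
  | [] => []
  | c :: m => if c ∈ seen then newElems seen m else c :: newElems (seen ++ [c]) m

-- B's loop = classify the fresh characters in first-occurrence order
theorem pv_B_inv (l : List Char) : ∀ (m : List Char) (seen : List Char) (p : List Char × List Char),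
    m.foldl
      (fun (st : PySem.Set Char × List Char × List Char) ch =>
        if PySem.Set.contains st.1 ch then st
        else (PySem.Set.add st.1 ch,
              if PySem.Chars.count l [ch] = 1 then (st.2.1 ++ [ch], st.2.2)
              else (st.2.1, st.2.2 ++ [ch])))
      (seen, p)
    = (seen ++ newElems seen m, (newElems seen m).foldl (pvG l) p) := by
  intro m
  induction m with
  | nil => intro seen p; simp [newElems]
  | cons c m ih =>
    intro seen p
    by_cases hc : c ∈ seen
    · simp only [List.foldl_cons, newElems, if_pos hc]
      have hcont : PySem.Set.contains seen c = true := by simp [PySem.Set.contains, hc]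
      rw [if_pos hcont]
      exact ih seen p
    · have hcont : PySem.Set.contains seen c = false := by simp [PySem.Set.contains, hc]
      have hadd : PySem.Set.add seen c = seen ++ [c] := by simp [PySem.Set.add, PySem.Set.contains, hc]
      simp only [List.foldl_cons, newElems, if_neg hc, hcont, Bool.false_eq_true, if_false, hadd]
      rw [ih (seen ++ [c]) _]
      simp [pvG]

theorem pv_update_eq_newElems : ∀ (m : List Char) (seen : List Char),
    PySem.Set.update seen m = seen ++ newElems seen m := by
  intro m
  induction m with
  | nil => intro seen; simp [PySem.Set.update, newElems]
  | cons c m ih =>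
    intro seen
    have h0 : PySem.Set.update seen (c :: m) = PySem.Set.update (PySem.Set.add seen c) m := rfl
    rw [h0]
    by_cases hc : c ∈ seen
    · have : PySem.Set.add seen c = seen := by simp [PySem.Set.add, PySem.Set.contains, hc]
      rw [this, ih, newElems, if_pos hc]
    · have : PySem.Set.add seen c = seen ++ [c] := by simp [PySem.Set.add, PySem.Set.contains, hc]
      rw [this, ih, newElems, if_neg hc]
      simp

theorem pv_ofList_eq_newElems (l : List Char) : PySem.Set.ofList l = newElems [] l := by
  have := pv_update_eq_newElems l []
  simpa [PySem.Set.ofList_eq_foldl, PySem.Set.update] using this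

-- A's dict pass = B's loop result, at the list level
theorem pv_listmain (l : List Char) :
    (l.foldl (fun d ch => d.insert ch (d.getD ch 0 + 1)) (PySem.Dict.empty : PySem.Dict Char Int)).items.foldl
      (fun (p : List Char × List Char) kv =>
        if kv.2 = 1 then (p.1 ++ [kv.1], p.2) else (p.1, p.2 ++ [kv.1]))
      ([], [])
    = (l.foldl
        (fun (st : PySem.Set Char × List Char × List Char) ch =>
          if PySem.Set.contains st.1 ch then st
          else (PySem.Set.add st.1 ch,
                if PySem.Chars.count l [ch] = 1 then (st.2.1 ++ [ch], st.2.2)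
                else (st.2.1, st.2.2 ++ [ch])))
        (PySem.Set.empty, [], [])).2 := by
  rw [PySem.Dict.foldl_insert_getD_add_one_eq_counter, PySem.Dict.items_counter, List.foldl_map]
  rw [pv_B_inv l l PySem.Set.empty ([], [])]
  dsimp only
  rw [pv_ofList_eq_newElems]
  have hempty : (PySem.Set.empty : PySem.Set Char) = ([] : List Char) := rfl
  rw [hempty]
  apply PySem.List.foldl_congr_mem
  intro acc x hx
  simp [pvG, pv_count_single, Nat.cast_eq_one]

-- ===== VERDICT (by name: the statement is the Claim_ definition above) =====
theorem two_string_spec : Claim_equal_two_string := by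
  intro input_str _
  unfold Spec_two_string
  simp only [two_string, two_string_alt]
  rw [pv_listmain input_str.toList]
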